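-- pv_equiv track=rewrite | github.com/wimmeldj/tennis_hierarchy_inference | tennis_prep/get_data.py | getLastName
-- ===== SOURCE A (Python) =====
-- def getLastName(full_name):
--     last_name = ""
--     for i in full_name:
--         if (i == "_" and last_name != "de" and last_name != "van" and last_name != "al"): # != intends to fix pre-fix issue
--             break
--         else:
--             last_name += i
--     return last_name
-- ===== SOURCE B (Python) =====
-- def getLastName(full_name):
--     parts = full_name.split("_")
--     result = parts[0]
--     if result in ("de", "van", "al") and len(parts) > 1:
--         result = result + "_" + parts[1]
--     return result
-- ===== Notes on version B (the rewrite author's own statement) =====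
-- stated objective: simpler
-- what changed: Replaces the character-by-character accumulate-and-break scan (with a prefix check at every underscore) with a single split on the underscore separator followed by one prefix check on the first token, joining the first two tokens when the first is a particle (de/van/al).
import Mathlib
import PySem

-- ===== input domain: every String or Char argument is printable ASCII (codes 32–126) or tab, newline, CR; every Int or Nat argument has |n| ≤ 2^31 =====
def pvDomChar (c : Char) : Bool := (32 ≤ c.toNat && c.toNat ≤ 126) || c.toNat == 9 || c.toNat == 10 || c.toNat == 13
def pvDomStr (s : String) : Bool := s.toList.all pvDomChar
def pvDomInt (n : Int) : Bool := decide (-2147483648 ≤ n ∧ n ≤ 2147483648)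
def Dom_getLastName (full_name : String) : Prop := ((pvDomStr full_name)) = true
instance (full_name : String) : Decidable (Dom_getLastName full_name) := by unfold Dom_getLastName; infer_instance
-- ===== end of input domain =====

-- B replaces A's char-by-char accumulate-and-break scan with a split on "_" plus one
-- prefix check on the first token (objective: simpler).

-- ===== PORT A =====
-- the for-loop over the characters, with its break; last_name accumulated left to right
-- (string equality in Python = code-point list equality, so the accumulator is List Char)
def getLastNameLoop : List Char → List Char → List Char
  | [], last_name => last_name
  | i :: rest, last_name =>
    if i = '_' ∧ last_name ≠ "de".toList ∧ last_name ≠ "van".toList ∧ last_name ≠ "al".toList then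
      last_name                                  -- break
    else
      getLastNameLoop rest (last_name ++ [i])    -- last_name += i

def getLastName (full_name : String) : String :=
  String.ofList (getLastNameLoop full_name.toList [])

-- ===== PORT B =====
def getLastName_alt (full_name : String) : String :=
  let parts := PySem.Chars.splitOn full_name.toList "_".toList   -- full_name.split("_")
  let result := parts.headD []                                   -- parts[0] (split never returns [])
  if (result = "de".toList ∨ result = "van".toList ∨ result = "al".toList) ∧ 1 < parts.length then
    String.ofList (result ++ '_' :: parts.getD 1 [])             -- result + "_" + parts[1]
  else
    String.ofList result

-- ===== PRECONDITION & SPEC =====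
def Spec_getLastName (full_name : String) (out : String) : Prop := out = getLastName_alt full_name
instance (full_name : String) (out : String) : Decidable (Spec_getLastName full_name out) := by unfold Spec_getLastName; infer_instance

-- ===== CLAIM (what is proved, stated in full; the proofs are below) =====
def Claim_equal_getLastName : Prop := ∀ (full_name : String), Dom_getLastName full_name → Spec_getLastName full_name (getLastName full_name)

-- ===== LEMMAS AND PROOFS =====

-- reference splitter: the list of '_'-separated segments, structurally
def pvSegs : List Char → List (List Char)
  | [] => [[]]
  | c :: rest =>
    if c = '_' then [] :: pvSegs rest
    else
      match pvSegs rest with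
      | s :: ss => (c :: s) :: ss
      | [] => [[c]]    -- unreachable: pvSegs never returns []

theorem pvSegs_ne_nil (l : List Char) : pvSegs l ≠ [] := by
  cases l with
  | nil => simp [pvSegs]
  | cons c rest =>
    simp only [pvSegs]
    split
    · simp
    · split <;> simp

theorem go_spec : ∀ (l : List Char) (f : Nat) (cur : List Char) (acc : List (List Char)),
    l.length < f →
    PySem.Chars.splitOn.go "_".toList f l cur acc =
      acc.reverse ++ (match pvSegs l with
                      | s :: ss => (cur.reverse ++ s) :: ss
                      | [] => []) := by
  intro l
  induction l with
  | nil =>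
    intro f cur acc hf
    match f, hf with
    | f + 1, _ =>
      simp [PySem.Chars.splitOn.go, pvSegs]
  | cons c rest ih =>
    intro f cur acc hf
    match f, hf with
    | f + 1, hf =>
      rw [PySem.Chars.splitOn.go]
      by_cases hc : c = '_'
      · subst hc
        have hpre : ("_".toList).isPrefixOf ('_' :: rest) = true := by
          simp [List.isPrefixOf]
        rw [hpre, if_pos rfl]
        have hih := ih f [] (cur.reverse :: acc) (by simpa using Nat.lt_of_succ_lt_succ hf)
        rw [show List.drop ("_".toList).length ('_' :: rest) = rest by simp]
        rw [hih]
        rcases hs : pvSegs rest with _ | ⟨s, ss⟩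
        · exact absurd hs (pvSegs_ne_nil rest)
        · simp [pvSegs, hs]
      · have hpre : ("_".toList).isPrefixOf (c :: rest) = false := by
          simp [List.isPrefixOf]
          exact fun h => absurd h.symm hc
        rw [hpre]
        simp only [Bool.false_eq_true, if_false]
        have := ih f (c :: cur) acc (Nat.lt_of_succ_lt_succ hf)
        rw [this]
        rcases hs : pvSegs rest with _ | ⟨s, ss⟩
        · exact absurd hs (pvSegs_ne_nil rest)
        · simp [pvSegs, hc, hs]

theorem splitOn_eq_segs (l : List Char) :
    PySem.Chars.splitOn l "_".toList = pvSegs l := by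
  rw [PySem.Chars.splitOn, go_spec l (l.length + 1) [] [] (Nat.lt_succ_self _)]
  rcases hs : pvSegs l with _ | ⟨s, ss⟩
  · exact absurd hs (pvSegs_ne_nil l)
  · simp

-- the one-step equation of A's loop
theorem loop_cons (i : Char) (rest acc : List Char) :
    getLastNameLoop (i :: rest) acc =
      if i = '_' ∧ acc ≠ "de".toList ∧ acc ≠ "van".toList ∧ acc ≠ "al".toList then acc
      else getLastNameLoop rest (acc ++ [i]) := rfl

-- decomposition of a list at its first underscore
theorem exists_first_underscore (cs : List Char) (h : '_' ∈ cs) :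
    ∃ p rest, cs = p ++ '_' :: rest ∧ '_' ∉ p := by
  induction cs with
  | nil => simp at h
  | cons c t ih =>
    by_cases hc : c = '_'
    · exact ⟨[], t, by simp [hc], by simp⟩
    · have ht : '_' ∈ t := by
        rcases List.mem_cons.mp h with h' | h'
        · exact absurd h'.symm hc
        · exact h'
      obtain ⟨p, rest, hdec, hp⟩ := ih ht
      refine ⟨c :: p, rest, by simp [hdec], ?_⟩
      intro hmem
      rcases List.mem_cons.mp hmem with h' | h'
      · exact hc h'.symm
      · exact hp h'

-- A's loop once the accumulator already contains an underscore: it stops at the next '_'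
theorem loop_underscore (rest : List Char) : ∀ (acc : List Char), '_' ∈ acc →
    getLastNameLoop rest acc = acc ++ rest.takeWhile (· ≠ '_') := by
  induction rest with
  | nil => intro acc _; simp [getLastNameLoop]
  | cons c rest ih =>
    intro acc hacc
    by_cases hc : c = '_'
    · subst hc
      have h1 : acc ≠ "de".toList := by intro h; subst h; simp at hacc
      have h2 : acc ≠ "van".toList := by intro h; subst h; simp at hacc
      have h3 : acc ≠ "al".toList := by intro h; subst h; simp at hacc
      rw [loop_cons, if_pos ⟨rfl, h1, h2, h3⟩]
      simp [List.takeWhile]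
    · rw [loop_cons, if_neg (fun h => hc h.1)]
      rw [ih (acc ++ [c]) (by simp [hacc])]
      simp [List.takeWhile, hc]

-- A's loop through an underscore-free prefix just appends it
theorem loop_passes (p : List Char) : ∀ (rest acc : List Char), '_' ∉ p →
    getLastNameLoop (p ++ rest) acc = getLastNameLoop rest (acc ++ p) := by
  induction p with
  | nil => intro rest acc _; simp
  | cons c p ih =>
    intro rest acc hp
    have hc : c ≠ '_' := fun h => hp (h ▸ List.mem_cons_self ..)
    rw [List.cons_append, loop_cons, if_neg (fun h => hc h.1)]
    rw [ih rest (acc ++ [c]) (fun h => hp (List.mem_cons_of_mem _ h))]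
    simp

theorem loop_no_underscore (p : List Char) (acc : List Char) (hp : '_' ∉ p) :
    getLastNameLoop p acc = acc ++ p := by
  have := loop_passes p [] acc hp
  simpa [getLastNameLoop] using this

-- pvSegs on a string with no underscore / decomposed at the first underscore
theorem segs_no_underscore (p : List Char) (hp : '_' ∉ p) : pvSegs p = [p] := by
  induction p with
  | nil => simp [pvSegs]
  | cons c p ih =>
    have hc : ¬ (c = '_') := fun h => hp (h ▸ List.mem_cons_self ..)
    simp only [pvSegs, hc, if_false]
    rw [ih (fun h => hp (List.mem_cons_of_mem _ h))]

theorem segs_split (p rest : List Char) (hp : '_' ∉ p) :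
    pvSegs (p ++ '_' :: rest) = p :: pvSegs rest := by
  induction p with
  | nil => simp [pvSegs]
  | cons c p ih =>
    have hc : ¬ (c = '_') := fun h => hp (h ▸ List.mem_cons_self ..)
    simp only [List.cons_append, pvSegs, hc, if_false]
    rw [ih (fun h => hp (List.mem_cons_of_mem _ h))]

theorem segs_head (l : List Char) : (pvSegs l).headD [] = l.takeWhile (· ≠ '_') := by
  induction l with
  | nil => simp [pvSegs]
  | cons c rest ih =>
    by_cases hc : c = '_'
    · subst hc; simp [pvSegs, List.takeWhile]
    · simp only [pvSegs, hc, if_false, List.takeWhile]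
      rcases hs : pvSegs rest with _ | ⟨s, ss⟩
      · exact absurd hs (pvSegs_ne_nil rest)
      · simp only [hs, List.headD_cons] at ih ⊢
        simp [ih, hc]

-- ===== VERDICT (by name: the statement is the Claim_ definition above) =====
theorem getLastName_spec : Claim_equal_getLastName := by
  intro full_name _
  unfold Spec_getLastName getLastName getLastName_alt
  rw [splitOn_eq_segs]
  set cs := full_name.toList with hcs
  by_cases hmem : '_' ∈ cs
  · -- decompose cs at its first underscore
    obtain ⟨p, rest, hdec, hp⟩ := exists_first_underscore cs hmem
    rw [hdec, segs_split p rest hp, loop_passes p ('_' :: rest) [] hp]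
    simp only [List.nil_append, List.headD_cons]
    by_cases hpre : p = "de".toList ∨ p = "van".toList ∨ p = "al".toList
    · -- first token is a particle: both keep the first two tokens
      have hcond : ¬ ('_' = '_' ∧ p ≠ "de".toList ∧ p ≠ "van".toList ∧ p ≠ "al".toList) := by
        rcases hpre with h | h | h <;> simp [h]
      rw [loop_cons, if_neg hcond]
      rw [loop_underscore rest (p ++ ['_']) (by simp)]
      have hlen : 1 < (p :: pvSegs rest).length := by
        have := pvSegs_ne_nil rest
        rcases hs : pvSegs rest with _ | ⟨s, ss⟩
        · exact absurd hs this
        · simp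
      rw [if_pos ⟨hpre, hlen⟩]
      have hget : (p :: pvSegs rest).getD 1 [] = rest.takeWhile (· ≠ '_') := by
        rcases hs : pvSegs rest with _ | ⟨s, ss⟩
        · exact absurd hs (pvSegs_ne_nil rest)
        · have := segs_head rest
          simp [hs] at this
          simp [this]
      rw [hget]
      simp
    · -- first token is not a particle: both stop at the first underscore
      have hcond : ('_' = '_' ∧ p ≠ "de".toList ∧ p ≠ "van".toList ∧ p ≠ "al".toList) := by
        simp only [not_or] at hpre
        exact ⟨rfl, hpre.1, hpre.2.1, hpre.2.2⟩
      rw [loop_cons, if_pos hcond]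
      have hlen : ¬ ((p = "de".toList ∨ p = "van".toList ∨ p = "al".toList) ∧ 1 < (p :: pvSegs rest).length) := by
        intro h; exact hpre h.1
      rw [if_neg hlen]
  · -- no underscore: both return the whole string
    rw [segs_no_underscore cs hmem, loop_no_underscore cs [] hmem]
    simp only [List.headD_cons, List.length_cons, List.length_nil]
    rw [if_neg (by simp)]
    simp
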